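-- pv_equiv track=rewrite | github.com/FMMT666/ncEFI | ncEFI.py | geomExtractSlotDirVecs
-- ===== SOURCE A (Python) =====
-- def geomExtractSlotDirVecs(geom):
-- 	gout=[]
-- 	i=1
-- 	j=0
-- 	for el in geom:
-- 		if j < 2:
-- 			el['pNr']=i
-- 			i+=1
-- 			gout.append(el)
-- 		j+=1
-- 		if j==4:
-- 			j=0
--
-- 	return gout
-- ===== SOURCE B (Python) =====
-- def geomExtractSlotDirVecs(geom):
-- 	def kept(g):
-- 		if not g:
-- 			return []
-- 		return g[:2] + kept(g[4:])
-- 	gout = kept(geom)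
-- 	for n, el in enumerate(gout, 1):
-- 		el['pNr'] = n
-- 	return gout
-- ===== Notes on version B (the rewrite author's own statement) =====
-- stated objective: alternative
-- what changed: Replaces A's single per-element loop with counters i and j (reset-to-zero modulo-4 counter deciding keeps, interleaved renumbering) by a recursion over 4-element blocks taken by slicing (keep g[:2], recurse on g[4:]) followed by a separate renumbering pass over the kept list.
import Mathlib
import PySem

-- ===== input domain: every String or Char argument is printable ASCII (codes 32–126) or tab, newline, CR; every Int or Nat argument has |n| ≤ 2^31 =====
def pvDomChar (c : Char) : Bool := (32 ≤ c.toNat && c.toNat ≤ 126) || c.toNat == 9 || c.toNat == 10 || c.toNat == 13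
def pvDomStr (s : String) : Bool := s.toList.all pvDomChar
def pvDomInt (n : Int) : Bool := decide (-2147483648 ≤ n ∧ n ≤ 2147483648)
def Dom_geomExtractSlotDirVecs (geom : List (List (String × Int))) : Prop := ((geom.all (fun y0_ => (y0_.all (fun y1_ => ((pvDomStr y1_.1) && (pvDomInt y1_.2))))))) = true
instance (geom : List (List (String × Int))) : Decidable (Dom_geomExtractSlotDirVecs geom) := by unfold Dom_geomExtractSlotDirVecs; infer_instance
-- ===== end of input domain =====

-- B replaces A's counter-driven single loop by a recursion over 4-element blocks taken by
-- slicing (keep g[:2], recurse on g[4:]) plus a separate renumbering pass (alternative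
-- decomposition; same cost). Both Pythons mutate the kept dicts in place; the equivalence
-- proved here is about the returned list of dicts.


-- el['pNr'] = v on an assoc-list dict (overwrite in place, new key appends) — exact Python dict-assignment semantics via PySem.Dict
def pvSetPNr (el : List (String × Int)) (v : Int) : List (String × Int) :=
  ((PySem.Dict.mk el).insert "pNr" v).items

-- loop body of A's for-loop (state: gout, i, j)
def pvStepA (st : List (List (String × Int)) × Int × Int) (el : List (String × Int)) :
    List (List (String × Int)) × Int × Int :=
  let gout := st.1
  let i := st.2.1
  let j := st.2.2
  let (gout, i) := if j < 2 then (gout ++ [pvSetPNr el i], i + 1) else (gout, i)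
  let j := j + 1
  let j := if j == 4 then (0 : Int) else j
  (gout, i, j)

-- ===== PORT A =====
def geomExtractSlotDirVecs (geom : List (List (String × Int))) : List (List (String × Int)) :=
  (geom.foldl pvStepA ([], 1, 0)).1

-- ===== PORT B =====
-- Source B's helper kept(g): if not g: return []; return g[:2] + kept(g[4:])
def pvKept : List (List (String × Int)) → List (List (String × Int))
  | [] => []
  | x :: rest => PySem.List.slice (x :: rest) none (some 2) ++ pvKept (PySem.List.slice (x :: rest) (some 4) none)
termination_by g => g.length
decreasing_by
  rw [show (4:Int) = ((4:Nat):Int) by norm_num, PySem.List.slice_from_natCast]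
  simp

def geomExtractSlotDirVecs_alt (geom : List (List (String × Int))) : List (List (String × Int)) :=
  let gout := pvKept geom
  (PySem.List.enumerate gout 1).map (fun p => pvSetPNr p.2 p.1)

-- ===== PRECONDITION & SPEC =====
def Spec_geomExtractSlotDirVecs (geom : List (List (String × Int))) (out : List (List (String × Int))) : Prop := out = geomExtractSlotDirVecs_alt geom
instance (geom : List (List (String × Int))) (out : List (List (String × Int))) : Decidable (Spec_geomExtractSlotDirVecs geom out) := by unfold Spec_geomExtractSlotDirVecs; infer_instance

-- ===== CLAIM (what is proved, stated in full; the proofs are below) =====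
def Claim_equal_geomExtractSlotDirVecs : Prop := ∀ (geom : List (List (String × Int))), Dom_geomExtractSlotDirVecs geom → Spec_geomExtractSlotDirVecs geom (geomExtractSlotDirVecs geom)

-- ===== LEMMAS AND PROOFS =====

-- selection skeleton: keep while the period-4 counter j is < 2
def pvSel : List (List (String × Int)) → Nat → List (List (String × Int))
  | [], _ => []
  | el :: rest, j => if j < 2 then el :: pvSel rest ((j + 1) % 4) else pvSel rest ((j + 1) % 4)

theorem pvStepA_keep (el : List (String × Int)) (acc : List (List (String × Int))) (i : Int) (j : Nat)
    (h2 : j < 2) :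
    pvStepA (acc, i, (j : Int)) el = (acc ++ [pvSetPNr el i], i + 1, (((j + 1) % 4 : Nat) : Int)) := by
  have hlt : ((j : Int) < 2) := by exact_mod_cast h2
  have hcast : ((j : Int) + 1) = (((j + 1) % 4 : Nat) : Int) := by
    have : (j + 1) % 4 = j + 1 := Nat.mod_eq_of_lt (by omega)
    rw [this]; push_cast; ring
  have hne : ((((j + 1) % 4 : Nat) : Int) == 4) = false := by
    have : (j + 1) % 4 < 4 := Nat.mod_lt _ (by norm_num)
    simp; omega
  simp only [pvStepA, if_pos hlt, hcast, hne, Bool.false_eq_true, if_false]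

theorem pvStepA_skip (el : List (String × Int)) (acc : List (List (String × Int))) (i : Int) (j : Nat)
    (hj : j < 4) (h2 : ¬ j < 2) :
    pvStepA (acc, i, (j : Int)) el = (acc, i, (((j + 1) % 4 : Nat) : Int)) := by
  by_cases h3 : j = 3
  · subst h3
    simp [pvStepA]
  · have hge : ¬ ((j : Int) < 2) := by exact_mod_cast h2
    have hcast : ((j : Int) + 1) = (((j + 1) % 4 : Nat) : Int) := by
      have : (j + 1) % 4 = j + 1 := Nat.mod_eq_of_lt (by omega)
      rw [this]; push_cast; ring
    have hne : ((((j + 1) % 4 : Nat) : Int) == 4) = false := by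
      have : (j + 1) % 4 < 4 := Nat.mod_lt _ (by norm_num)
      simp; omega
    simp only [pvStepA, if_neg hge, hcast, hne, Bool.false_eq_true, if_false]

theorem pvA_fold (geom : List (List (String × Int))) :
    ∀ (j : Nat), j < 4 → ∀ (acc : List (List (String × Int))) (i : Int),
    (geom.foldl pvStepA (acc, i, (j : Int))).1
    = acc ++ (PySem.List.enumerate (pvSel geom j) i).map (fun p => pvSetPNr p.2 p.1) := by
  induction geom with
  | nil => intro j hj acc i; simp [pvSel]
  | cons el rest ih =>
    intro j hj acc i
    by_cases h2 : j < 2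
    · rw [List.foldl_cons, pvStepA_keep el acc i j h2,
        ih ((j + 1) % 4) (Nat.mod_lt _ (by norm_num)) _ _]
      simp [pvSel, h2, PySem.List.enumerate_cons]
    · rw [List.foldl_cons, pvStepA_skip el acc i j hj h2,
        ih ((j + 1) % 4) (Nat.mod_lt _ (by norm_num)) _ _]
      simp [pvSel, h2]

theorem pvKept_nil : pvKept [] = [] := by simp [pvKept]

theorem pvKept_cons (x : List (String × Int)) (rest : List (List (String × Int))) :
    pvKept (x :: rest) = (x :: rest).take 2 ++ pvKept ((x :: rest).drop 4) := by
  simp only [pvKept]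
  rw [show PySem.List.slice (x :: rest) none (some 2) = (x :: rest).take 2 by
    simpa using PySem.List.slice_to_natCast (x :: rest) 2]
  rw [show PySem.List.slice (x :: rest) (some 4) none = (x :: rest).drop 4 by
    simpa using PySem.List.slice_from_natCast (x :: rest) 4]

theorem pvKept_eq_sel (g : List (List (String × Int))) : pvKept g = pvSel g 0 := by
  match g with
  | [] => simp [pvKept_nil, pvSel]
  | [x] => simp [pvKept_cons, pvKept_nil, pvSel]
  | [x, y] => simp [pvKept_cons, pvKept_nil, pvSel]
  | [x, y, z] => simp [pvKept_cons, pvKept_nil, pvSel]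
  | x :: y :: z :: w :: rest =>
    have ih := pvKept_eq_sel rest
    rw [pvKept_cons]
    simp [pvSel, ih]
termination_by g.length

-- ===== VERDICT (by name: the statement is the Claim_ definition above) =====
theorem geomExtractSlotDirVecs_spec : Claim_equal_geomExtractSlotDirVecs := by
  intro geom _
  show geomExtractSlotDirVecs geom = geomExtractSlotDirVecs_alt geom
  unfold geomExtractSlotDirVecs geomExtractSlotDirVecs_alt
  have hA := pvA_fold geom 0 (by norm_num) [] 1
  rw [Int.natCast_zero] at hA
  rw [hA, List.nil_append, pvKept_eq_sel]
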